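-- pv_equiv track=rewrite | github.com/Furkanahii/Rheo-MVP | New Era Python/cmpeexam3.py | running_minmax
-- ===== SOURCE A (Python) =====
-- def running_minmax(u):
--     list1=[]
--     list2=[]
--     minval=u[0]
--     maxval=u[0]
--     for x in u:
--         if x<minval:
--             minval = x
--             list1.append(minval)
--         else:
--             list1.append(minval)
--     for y in u:
--         if y>maxval:
--             maxval = y
--             list2.append(maxval)
--         else:
--             list2.append(maxval)
--     return list1,list2
-- ===== SOURCE B (Python) =====
-- def running_minmax(u):
--     minval = u[0]
--     maxval = u[0]
--     list1 = []
--     list2 = []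
--     for x in u:
--         if x < minval:
--             minval = x
--         if x > maxval:
--             maxval = x
--         list1.append(minval)
--         list2.append(maxval)
--     return list1, list2
-- ===== Notes on version B (the rewrite author's own statement) =====
-- stated objective: simpler
-- what changed: A's two separate sequential passes (one building the running-minimum list, then another building the running-maximum list) are fused into a single loop that maintains both the minimum and the maximum together and appends to both lists per element.
import Mathlib
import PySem

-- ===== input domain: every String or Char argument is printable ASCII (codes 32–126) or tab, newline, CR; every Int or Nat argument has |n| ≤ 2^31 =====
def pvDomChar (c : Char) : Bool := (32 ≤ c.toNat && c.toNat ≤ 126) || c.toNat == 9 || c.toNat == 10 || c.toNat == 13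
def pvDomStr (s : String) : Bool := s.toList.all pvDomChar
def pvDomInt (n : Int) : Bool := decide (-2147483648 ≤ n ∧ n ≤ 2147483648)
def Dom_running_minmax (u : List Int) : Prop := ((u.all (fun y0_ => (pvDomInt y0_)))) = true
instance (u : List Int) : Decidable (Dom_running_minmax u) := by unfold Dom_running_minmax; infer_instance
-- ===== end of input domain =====

-- B fuses A's two sequential passes into one loop maintaining both running min and max; return value equivalence proved on non-empty lists (A raises IndexError on []).

-- ===== PORT A =====
-- first loop of A: state = (minval, list1)
def pvStepMin (s : Int × List Int) (x : Int) : Int × List Int :=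
  if x < s.1 then (x, s.2 ++ [x]) else (s.1, s.2 ++ [s.1])

-- second loop of A: state = (maxval, list2)
def pvStepMax (s : Int × List Int) (y : Int) : Int × List Int :=
  if y > s.1 then (y, s.2 ++ [y]) else (s.1, s.2 ++ [s.1])

def running_minmax (u : List Int) : List Int × List Int :=
  match u with
  | [] => ([], [])  -- unreachable under Pre_ (A raises IndexError on the first-element access)
  | h :: _ =>
    let r1 := u.foldl pvStepMin (h, [])
    let r2 := u.foldl pvStepMax (h, [])
    (r1.2, r2.2)

-- ===== PORT B =====
-- single fused loop: state = (minval, maxval, list1, list2)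
def pvStepB (s : Int × Int × List Int × List Int) (x : Int) : Int × Int × List Int × List Int :=
  let mn := if x < s.1 then x else s.1
  let mx := if x > s.2.1 then x else s.2.1
  (mn, mx, s.2.2.1 ++ [mn], s.2.2.2 ++ [mx])

def running_minmax_alt (u : List Int) : List Int × List Int :=
  match u with
  | [] => ([], [])  -- unreachable under Pre_ (B raises IndexError on the first-element access)
  | h :: _ =>
    let r := u.foldl pvStepB (h, h, [], [])
    (r.2.2.1, r.2.2.2)

-- ===== PRECONDITION & SPEC =====
-- Pre_ excludes only the empty list, on which both A and B raise IndexError accessing the first element.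
def Pre_running_minmax (u : List Int) : Prop := u ≠ []
instance (u : List Int) : Decidable (Pre_running_minmax u) := by unfold Pre_running_minmax; infer_instance
def pvWitness_running_minmax : List Int := [3, 1, 2]

def Spec_running_minmax (u : List Int) (out : List Int × List Int) : Prop := out = running_minmax_alt u
instance (u : List Int) (out : List Int × List Int) : Decidable (Spec_running_minmax u out) := by unfold Spec_running_minmax; infer_instance

-- ===== CLAIM (what is proved, stated in full; the proofs are below) =====
def Claim_equal_running_minmax : Prop := ∀ (u : List Int), Dom_running_minmax u → Pre_running_minmax u → Spec_running_minmax u (running_minmax u)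

-- ===== LEMMAS AND PROOFS =====
-- the fused fold computes exactly the pair of A's two folds
theorem pv_fused (u : List Int) (mn mx : Int) (l1 l2 : List Int) :
    u.foldl pvStepB (mn, mx, l1, l2) =
      ((u.foldl pvStepMin (mn, l1)).1, (u.foldl pvStepMax (mx, l2)).1,
       (u.foldl pvStepMin (mn, l1)).2, (u.foldl pvStepMax (mx, l2)).2) := by
  induction u generalizing mn mx l1 l2 with
  | nil => rfl
  | cons x t ih =>
    simp only [List.foldl_cons, pvStepB, pvStepMin, pvStepMax]
    split_ifs <;> simp [ih]

-- ===== VERDICT (by name: the statement is the Claim_ definition above) =====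
theorem running_minmax_spec : Claim_equal_running_minmax := by
  intro u _ hpre
  cases u with
  | nil => exact absurd rfl hpre
  | cons h t =>
    show running_minmax (h :: t) = running_minmax_alt (h :: t)
    simp only [running_minmax, running_minmax_alt, pv_fused]
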